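-- pv_equiv track=rewrite | github.com/DonRadonZ/senior-project | backend/ID_Card.py | checkPID
-- ===== SOURCE A (Python) =====
-- def checkPID(pid):
--   if(len(pid) != 13): # ถ้า pid ไม่ใช่ 13 ให้คืนค่า False
--     return False
--   num=0 # ค่าสำหรับอ้างอิง index list ข้อมูลบัตรประชาชน
--   num2=13 # ค่าประจำหลัก
--   listdata=list(pid) # list ข้อมูลบัตรประชาชน
--   sum=0 # ผลลัพธ์
--   while num<12:
--     sum+=int(listdata[num])*(num2-num) # นำค่า num เป็น index list แต่ละตัว * (num2 - num) แล้วรวมเข้ากับ sum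
--     num+=1 # เพิ่มค่า num อีก 1
--   digit13 = sum%11 # sum หาร 11 เอาเศษ
--   if digit13==0: # ถ้าเศษ = 0
--     digit13=1 # ค่าหลักที่ 13 คือ 1
--   elif digit13==1: # ถ้าเศษ = 1
--     digit13=0 # ค่าหลักที่ 13 คือ 0
--   else:
--     digit13=11-digit13 # ถ้าเศษไม่ใช่กับอะไร ให้เอา 11 - digit13
--   if digit13==int(listdata[12]): # ถ้าค่าหลักที่ 13 เท่ากับค่าหลักที่ 13 ที่ป้อนข้อมูลมา คืนค่า True
--     return True
--   else: # ถ้าค่าหลักที่ 13 ไม่เท่ากับค่าหลักที่ 13 ที่ป้อนข้อมูลมา คืนค่า False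
--     return False
-- ===== SOURCE B (Python) =====
-- def checkPID(pid):
--     if len(pid) != 13:
--         return False
--     # Weighted sum by double accumulation: weight 13-i equals one occurrence of
--     # digit i in each prefix sum P_j (j >= i, j = 0..11) plus one extra P_11,
--     # so sum(d_i*(13-i)) = P_0 + P_1 + ... + P_11 + P_11 -- no multiplications.
--     p = 0  # running prefix sum of the digits
--     s = 0  # running sum of the prefix sums
--     for ch in pid[:12]:
--         p += int(ch)
--         s += p
--     s += p
--     return (11 - s % 11) % 10 == int(pid[12])
-- ===== Notes on version B (the rewrite author's own statement) =====
-- stated objective: alternative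
-- what changed: Computes the weighted checksum without any multiplication, by a double accumulation (sum of running prefix sums, using that weight 13-i counts the prefixes containing digit i), and replaces A's three-way remainder branch with the closed form (11 - s % 11) % 10.
import Mathlib
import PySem

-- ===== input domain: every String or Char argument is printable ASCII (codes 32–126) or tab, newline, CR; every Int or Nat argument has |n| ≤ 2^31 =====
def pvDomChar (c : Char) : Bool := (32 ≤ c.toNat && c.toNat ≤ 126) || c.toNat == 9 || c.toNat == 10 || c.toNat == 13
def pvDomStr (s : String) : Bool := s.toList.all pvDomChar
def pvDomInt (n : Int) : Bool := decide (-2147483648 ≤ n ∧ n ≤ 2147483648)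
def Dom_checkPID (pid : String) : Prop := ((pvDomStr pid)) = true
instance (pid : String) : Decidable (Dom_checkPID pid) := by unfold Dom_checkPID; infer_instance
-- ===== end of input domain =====

-- B computes the weighted checksum by a multiplication-free double accumulation (sum of running
-- prefix sums) and replaces A's three-way remainder branch with the closed form (11 - s%11) % 10.

-- ===== PORT A =====
-- int(listdata[num]): in-range index and successful parse are guaranteed by Pre_checkPID;
-- outside Pre_ Python raises, so the .getD defaults are never exercised on admitted inputs.
def pvIntAt (cs : List Char) (i : Int) : Int :=
  (PySem.Int.ofChars? [(PySem.List.pyGet? cs i).getD ' ']).getD 0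

-- the 'while num < 12' loop of A, with its state (num, sum)
def checkPIDLoop (listdata : List Char) (num : Nat) (sum : Int) : Int :=
  if num < 12 then
    checkPIDLoop listdata (num + 1) (sum + pvIntAt listdata num * (13 - (num : Int)))
  else sum
termination_by 12 - num

def checkPID (pid : String) : Bool :=
  if PySem.Str.len pid ≠ 13 then false
  else
    let listdata := pid.toList
    let sum := checkPIDLoop listdata 0 0
    let digit13 := PySem.Int.mod sum 11
    let digit13 := if digit13 = 0 then (1 : Int) else if digit13 = 1 then 0 else 11 - digit13
    if digit13 = pvIntAt listdata 12 then true else false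

-- ===== PORT B =====
-- int(ch) for a single character ch (successful parse guaranteed by Pre_checkPID)
def pvIntOfChar (c : Char) : Int := (PySem.Int.ofChars? [c]).getD 0

-- the 'for ch in pid[:12]' loop of B, with its state (p, s)
def checkPIDLoopB : List Char → Int × Int → Int × Int
  | [], ps => ps
  | c :: cs, (p, s) => checkPIDLoopB cs (p + pvIntOfChar c, s + (p + pvIntOfChar c))

def checkPID_alt (pid : String) : Bool :=
  if PySem.Str.len pid ≠ 13 then false
  else
    let ps := checkPIDLoopB (PySem.List.slice pid.toList none (some 12)) (0, 0)
    let s := ps.2 + ps.1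
    decide (PySem.Int.mod (11 - PySem.Int.mod s 11) 10 = pvIntAt pid.toList 12)

-- ===== PRECONDITION & SPEC =====
-- Pre_ excludes exactly the inputs where Python's int() raises ValueError: length-13 strings
-- containing a non-digit character (on those both A and B raise; shorter/longer strings return False).
def Pre_checkPID (pid : String) : Prop :=
  pid.toList.length = 13 → PySem.Chars.strIsdigit pid.toList = true
instance (pid : String) : Decidable (Pre_checkPID pid) := by unfold Pre_checkPID; infer_instance
def pvWitness_checkPID : String := "2636794047005"

def Spec_checkPID (pid : String) (out : Bool) : Prop := out = checkPID_alt pid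
instance (pid : String) (out : Bool) : Decidable (Spec_checkPID pid out) := by unfold Spec_checkPID; infer_instance

-- ===== CLAIM (what is proved, stated in full; the proofs are below) =====
def Claim_equal_checkPID : Prop := ∀ (pid : String), Dom_checkPID pid → Pre_checkPID pid → Spec_checkPID pid (checkPID pid)

-- ===== LEMMAS AND PROOFS =====

-- a list of length 13 is exactly thirteen elements
theorem pvList13 (xs : List Char) (h : xs.length = 13) :
    ∃ c0 c1 c2 c3 c4 c5 c6 c7 c8 c9 c10 c11 c12,
      xs = [c0, c1, c2, c3, c4, c5, c6, c7, c8, c9, c10, c11, c12] := by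
  rcases xs with _ | ⟨c0, _ | ⟨c1, _ | ⟨c2, _ | ⟨c3, _ | ⟨c4, _ | ⟨c5, _ | ⟨c6,
    _ | ⟨c7, _ | ⟨c8, _ | ⟨c9, _ | ⟨c10, _ | ⟨c11, _ | ⟨c12, _ | ⟨c13, t⟩⟩⟩⟩⟩⟩⟩⟩⟩⟩⟩⟩⟩⟩ <;>
    simp_all

-- A's three-way remainder branch is B's closed form, for 0 ≤ r < 11
theorem branch_eq_mod (r : Int) (h0 : 0 ≤ r) (h1 : r < 11) :
    (if r = 0 then (1 : Int) else if r = 1 then 0 else 11 - r) = PySem.Int.mod (11 - r) 10 := by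
  interval_cases r <;> decide

-- ===== VERDICT (by name: the statement is the Claim_ definition above) =====
theorem checkPID_spec : Claim_equal_checkPID := by
  intro pid _ _
  unfold Spec_checkPID checkPID checkPID_alt
  by_cases hl : PySem.Str.len pid ≠ 13
  · rw [if_pos hl, if_pos hl]
  · rw [if_neg hl, if_neg hl]
    have hlen : pid.toList.length = 13 := by
      have h1 : (pid.length : Int) = 13 := by simpa [PySem.Str.len_eq] using not_ne_iff.mp hl
      have h2 : pid.length = 13 := by exact_mod_cast h1
      simpa using h2
    obtain ⟨c0, c1, c2, c3, c4, c5, c6, c7, c8, c9, c10, c11, c12, hcs⟩ :=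
      pvList13 pid.toList hlen
    rw [hcs]
    dsimp only
    rw [show checkPIDLoop [c0, c1, c2, c3, c4, c5, c6, c7, c8, c9, c10, c11, c12] 0 0 =
        pvIntOfChar c0 * 13 + pvIntOfChar c1 * 12 + pvIntOfChar c2 * 11 + pvIntOfChar c3 * 10 +
        pvIntOfChar c4 * 9 + pvIntOfChar c5 * 8 + pvIntOfChar c6 * 7 + pvIntOfChar c7 * 6 +
        pvIntOfChar c8 * 5 + pvIntOfChar c9 * 4 + pvIntOfChar c10 * 3 + pvIntOfChar c11 * 2 from by
      simp [checkPIDLoop, pvIntAt, pvIntOfChar, PySem.List.pyGet?, PySem.List.pyIdx?]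
      try ring]
    rw [show (checkPIDLoopB (PySem.List.slice
          [c0, c1, c2, c3, c4, c5, c6, c7, c8, c9, c10, c11, c12] none (some 12)) (0, 0)) =
        (pvIntOfChar c0 + pvIntOfChar c1 + pvIntOfChar c2 + pvIntOfChar c3 + pvIntOfChar c4 +
           pvIntOfChar c5 + pvIntOfChar c6 + pvIntOfChar c7 + pvIntOfChar c8 + pvIntOfChar c9 +
           pvIntOfChar c10 + pvIntOfChar c11,
         pvIntOfChar c0 * 12 + pvIntOfChar c1 * 11 + pvIntOfChar c2 * 10 + pvIntOfChar c3 * 9 +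
           pvIntOfChar c4 * 8 + pvIntOfChar c5 * 7 + pvIntOfChar c6 * 6 + pvIntOfChar c7 * 5 +
           pvIntOfChar c8 * 4 + pvIntOfChar c9 * 3 + pvIntOfChar c10 * 2 + pvIntOfChar c11) from by
      rw [show PySem.List.slice
          [c0, c1, c2, c3, c4, c5, c6, c7, c8, c9, c10, c11, c12] none (some 12) =
          [c0, c1, c2, c3, c4, c5, c6, c7, c8, c9, c10, c11] from by
        rw [show ((12 : Int)) = ((12 : Nat) : Int) from by norm_num,
          PySem.List.slice_to_natCast]
        rfl]
      simp [checkPIDLoopB, Prod.ext_iff]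
      all_goals ring]
    dsimp only
    set s := pvIntOfChar c0 * 13 + pvIntOfChar c1 * 12 + pvIntOfChar c2 * 11 +
      pvIntOfChar c3 * 10 + pvIntOfChar c4 * 9 + pvIntOfChar c5 * 8 + pvIntOfChar c6 * 7 +
      pvIntOfChar c7 * 6 + pvIntOfChar c8 * 5 + pvIntOfChar c9 * 4 + pvIntOfChar c10 * 3 +
      pvIntOfChar c11 * 2 with hs
    rw [show pvIntOfChar c0 * 12 + pvIntOfChar c1 * 11 + pvIntOfChar c2 * 10 +
        pvIntOfChar c3 * 9 + pvIntOfChar c4 * 8 + pvIntOfChar c5 * 7 + pvIntOfChar c6 * 6 +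
        pvIntOfChar c7 * 5 + pvIntOfChar c8 * 4 + pvIntOfChar c9 * 3 + pvIntOfChar c10 * 2 +
        pvIntOfChar c11 +
        (pvIntOfChar c0 + pvIntOfChar c1 + pvIntOfChar c2 + pvIntOfChar c3 + pvIntOfChar c4 +
          pvIntOfChar c5 + pvIntOfChar c6 + pvIntOfChar c7 + pvIntOfChar c8 + pvIntOfChar c9 +
          pvIntOfChar c10 + pvIntOfChar c11) = s from by rw [hs]; ring]
    rw [branch_eq_mod (PySem.Int.mod s 11) (PySem.Int.mod_nonneg s (by norm_num))
      (PySem.Int.mod_lt s (by norm_num))]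
    by_cases h : PySem.Int.mod (11 - PySem.Int.mod s 11) 10 = pvIntAt
        [c0, c1, c2, c3, c4, c5, c6, c7, c8, c9, c10, c11, c12] 12
    · rw [if_pos h]; exact (decide_eq_true h).symm
    · rw [if_neg h]; exact (decide_eq_false h).symm
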